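-- pv_equiv track=rewrite | github.com/EttoreRandazzo/Mingle | classification/classifiers.py | create_markov_data
-- ===== SOURCE A (Python) =====
-- def create_markov_data(data,order):
--     """
--
--     :param data: inputs
--     :param order: the order of the markov chain
--     :return: a new data with markov assumptions. num rows: len(data) - order. num cols: len(data[0])*(1 + order)
--     """
--     result = []
--     for i in range(order,len(data)):
--         row = []
--         for step in range(0,order + 1):
--             row += data[i-step]
--         result.append(row)
--     return result
-- ===== SOURCE B (Python) =====
-- def create_markov_data(data, order):
--     """
--
--     :param data: inputs
--     :param order: the order of the markov chain
--     :return: a new data with markov assumptions. num rows: len(data) - order. num cols: len(data[0])*(1 + order)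
--     """
--     # Table-then-zip decomposition: build the order+1 shifted windows once,
--     # then emit each output row by concatenating the aligned parts.
--     if order >= len(data):
--         return []
--     slices = [data[order - step: len(data) - step] for step in range(order + 1)]
--     result = []
--     for parts in zip(*slices):
--         row = []
--         for part in parts:
--             row.extend(part)
--         result.append(row)
--     return result
-- ===== Notes on version B (the rewrite author's own statement) =====
-- stated objective: alternative
-- what changed: Replaces A's per-row nested indexing loop with a table-then-zip decomposition: build the order+1 shifted slices once, then emit each row in one aligned pass over zip(*slices).
-- outside the precondition, e.g. on create_markov_data([[1]], -1): A returns [[], []], B returns []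
import Mathlib
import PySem

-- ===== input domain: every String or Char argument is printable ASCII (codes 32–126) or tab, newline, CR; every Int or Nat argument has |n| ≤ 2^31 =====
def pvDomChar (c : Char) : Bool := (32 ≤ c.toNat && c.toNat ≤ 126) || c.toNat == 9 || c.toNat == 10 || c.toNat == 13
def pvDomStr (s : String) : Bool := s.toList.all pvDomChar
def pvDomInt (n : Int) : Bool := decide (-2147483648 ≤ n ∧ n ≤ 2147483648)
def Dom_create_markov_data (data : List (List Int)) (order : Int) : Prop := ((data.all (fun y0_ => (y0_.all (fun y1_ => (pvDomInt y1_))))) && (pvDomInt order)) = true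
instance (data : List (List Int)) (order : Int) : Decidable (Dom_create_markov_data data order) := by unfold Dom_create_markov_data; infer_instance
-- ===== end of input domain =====

-- B replaces A's per-row nested indexing loop by a table-then-zip decomposition (same cost; objective: alternative).

-- ===== PORT A =====
-- data[i-step]: under Pre_ (0 ≤ order) every index i-step lies in [0, len(data)), so pyGetD's default is never used.
def create_markov_data (data : List (List Int)) (order : Int) : List (List Int) :=
  (PySem.List.pyRange order (data.length : Int) 1).foldl
    (fun result i =>
      result ++ [(PySem.List.pyRange 0 (order + 1) 1).foldl
        (fun row step => row ++ PySem.List.pyGetD data (i - step) []) []])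
    []

-- ===== PORT B =====
-- zip(*slices): take aligned heads while every list is nonempty; fuel = length of the first list
-- (zip stops at the shortest list; when the fuel runs out the first list is exhausted, so zip stops there too).
def pyZipStarGo : Nat → List (List (List Int)) → List (List (List Int))
  | 0, _ => []
  | n + 1, ls =>
    if ls.all (fun l => !l.isEmpty) then
      ls.map (fun l => l.headD []) :: pyZipStarGo n (ls.map List.tail)
    else []

def pyZipStar (ls : List (List (List Int))) : List (List (List Int)) :=
  match ls with
  | [] => []
  | l :: rest => pyZipStarGo l.length (l :: rest)

def create_markov_data_alt (data : List (List Int)) (order : Int) : List (List Int) :=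
  if (data.length : Int) ≤ order then [] else
  let slices := (PySem.List.pyRange 0 (order + 1) 1).map
    (fun step => PySem.List.slice data (some (order - step)) (some ((data.length : Int) - step)))
  (pyZipStar slices).map (fun parts => parts.foldl (fun row part => row ++ part) [])

-- ===== PRECONDITION & SPEC =====
-- Pre_ restricts to the natural domain of a Markov order: order ≥ 0. For a negative order (outside the
-- function's natural domain) A still returns a value — len(data)-order empty rows, an artefact of
-- range(order, len(data)) starting below 0 with an empty inner range — while B returns [].
def Pre_create_markov_data (data : List (List Int)) (order : Int) : Prop := 0 ≤ order
instance (data : List (List Int)) (order : Int) : Decidable (Pre_create_markov_data data order) := by unfold Pre_create_markov_data; infer_instance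

def pvWitness_create_markov_data : List (List Int) × Int := ([[1, 2], [3, 4], [5, 6]], 1)

def Spec_create_markov_data (data : List (List Int)) (order : Int) (out : List (List Int)) : Prop := out = create_markov_data_alt data order
instance (data : List (List Int)) (order : Int) (out : List (List Int)) : Decidable (Spec_create_markov_data data order out) := by unfold Spec_create_markov_data; infer_instance

-- ===== CLAIM (what is proved, stated in full; the proofs are below) =====
def Claim_equal_create_markov_data : Prop := ∀ (data : List (List Int)) (order : Int), Dom_create_markov_data data order → Pre_create_markov_data data order → Spec_create_markov_data data order (create_markov_data data order)

-- ===== LEMMAS AND PROOFS =====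

-- zip(*ls) over lists all at least m long is the m-row table of aligned getD's.
theorem pyZipStarGo_eq (m : Nat) (ls : List (List (List Int))) (h : ∀ l ∈ ls, m ≤ l.length) :
    pyZipStarGo m ls = (List.range m).map (fun j => ls.map (fun l => l.getD j [])) := by
  induction m generalizing ls with
  | zero => simp [pyZipStarGo]
  | succ n ih =>
    have hall : ls.all (fun l => !l.isEmpty) = true := by
      rw [List.all_eq_true]
      intro l hl
      have := h l hl
      simp only [Bool.not_eq_eq_eq_not, Bool.not_true, List.isEmpty_eq_false_iff]
      intro hnil
      rw [hnil] at this; simp at this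
    rw [pyZipStarGo, if_pos hall, ih (ls.map List.tail) (by
      intro l hl
      obtain ⟨l', hl', rfl⟩ := List.mem_map.mp hl
      have := h l' hl'
      simp only [List.length_tail]; omega)]
    rw [List.range_succ_eq_map]
    simp only [List.map_cons, List.map_map]
    congr 1
    · apply List.map_congr_left
      intro l hl
      have h1 : l ≠ [] := by
        intro hnil; have := h l hl; rw [hnil] at this; simp at this
      cases l with
      | nil => simp at h1
      | cons a t => simp [List.getD]
    · apply List.map_congr_left
      intro j _
      apply List.map_congr_left
      intro l hl
      have h1 : l ≠ [] := by
        intro hnil; have := h l hl; rw [hnil] at this; simp at this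
      cases l with
      | nil => simp at h1
      | cons a t => simp [List.getD]

-- A's value for order ≥ 0, as a table of flattened rows.
theorem portA_eq (data : List (List Int)) (order : Int) (h : 0 ≤ order) :
    create_markov_data data order =
      (List.range (data.length - order.toNat)).map
        (fun (j : Nat) => ((PySem.List.pyRange 0 (order + 1) 1).map
          (fun step => PySem.List.pyGetD data (order + (j : Int) - step) [])).flatten) := by
  unfold create_markov_data
  rw [PySem.List.foldl_append_singleton_eq_map]
  rw [PySem.List.pyRange_one order (data.length : Int)]
  have hL : ((data.length : Int) - order).toNat = data.length - order.toNat := by omega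
  rw [hL, List.map_map, List.nil_append]
  apply List.map_congr_left
  intro j _
  simp only [Function.comp_apply]
  rw [PySem.List.foldl_append_eq_flatMap]
  simp [List.flatMap_def]

-- B's value for order ≥ 0, as the same table.
theorem portB_eq (data : List (List Int)) (order : Int) (h : 0 ≤ order) :
    create_markov_data_alt data order =
      (List.range (data.length - order.toNat)).map
        (fun (j : Nat) => ((PySem.List.pyRange 0 (order + 1) 1).map
          (fun step => PySem.List.pyGetD data (order + (j : Int) - step) [])).flatten) := by
  obtain ⟨k, rfl⟩ := Int.eq_ofNat_of_zero_le h
  set n := data.length with hn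
  by_cases hord : (n : Int) ≤ (k : Int)
  · simp only [create_markov_data_alt]
    rw [if_pos hord]
    have hz : n - k = 0 := by omega
    rw [Int.toNat_natCast, hz]
    simp
  have hrange : PySem.List.pyRange 0 ((k : Int) + 1) 1
      = (List.range (k + 1)).map (fun (t : Nat) => (t : Int)) := by
    have h1 : (((k : Int) + 1) - 0).toNat = k + 1 := by omega
    rw [PySem.List.pyRange_one, h1]
    apply List.map_congr_left; intro t _; omega
  -- the slice at shift t, for t ≤ k < n
  have hS : ∀ t : Nat, t ≤ k → k < n →
      PySem.List.slice data (some ((k : Int) - (t : Int))) (some ((n : Int) - (t : Int)))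
        = (data.drop (k - t)).take (n - k) := by
    intro t ht hkn
    have e1 : (k : Int) - (t : Int) = ((k - t : Nat) : Int) := by omega
    have e2 : (n : Int) - (t : Int) = ((n - t : Nat) : Int) := by omega
    rw [e1, e2, PySem.List.slice_natCast]
    congr 1
    omega
  simp only [create_markov_data_alt]
  rw [if_neg hord]
  simp only [hrange, List.map_map]
  set F := fun (t : Nat) => PySem.List.slice data (some ((k : Int) - (t : Int)))
      (some ((n : Int) - (t : Int))) with hF
  have hcomp : ((fun step => PySem.List.slice data (some ((k:Int) - step)) (some ((n:Int) - step)))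
      ∘ fun (t : Nat) => (t : Int)) = F := by
    funext t; simp [hF]
  rw [hcomp]
  have hsl : (List.range (k + 1)).map F = F 0 :: ((List.range k).map (fun t => F (t + 1))) := by
    rw [List.range_succ_eq_map, List.map_cons, List.map_map]
    rfl
  have hlen0 : (F 0).length = n - k := by
    simp only [hF]
    have e1 : (k : Int) - ((0:Nat) : Int) = ((k : Nat) : Int) := by omega
    have e2 : (n : Int) - ((0:Nat) : Int) = ((n : Nat) : Int) := by omega
    rw [e1, e2, PySem.List.slice_natCast]
    simp [hn]
  have hzip : pyZipStar ((List.range (k + 1)).map F)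
      = pyZipStarGo (n - k) ((List.range (k + 1)).map F) := by
    rw [hsl]
    simp only [pyZipStar]
    rw [hlen0]
  rw [hzip, pyZipStarGo_eq (n - k) _ ?hb]
  case hb =>
    intro l hl
    obtain ⟨t, htm, rfl⟩ := List.mem_map.mp hl
    have ht : t ≤ k := by have := List.mem_range.mp htm; omega
    by_cases hkn : k < n
    · simp only [hF]
      rw [hS t ht hkn]
      simp
      omega
    · omega
  rw [List.map_map]
  apply List.map_congr_left
  intro j hj
  have hjL : j < n - k := List.mem_range.mp hj
  have hkn : k < n := by omega
  simp only [Function.comp_apply, List.map_map]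
  rw [PySem.List.foldl_append_eq_flatten, List.nil_append]
  congr 1
  apply List.map_congr_left
  intro t htm
  have ht : t ≤ k := by have := List.mem_range.mp (by exact htm); omega
  simp only [Function.comp_apply]
  simp only [hF]
  rw [hS t ht hkn]
  have eidx : (k : Int) + (j : Int) - (t : Int) = ((k - t + j : Nat) : Int) := by omega
  rw [eidx, PySem.List.pyGetD_natCast]
  rw [List.getD_eq_getElem?_getD, List.getD_eq_getElem?_getD]
  rw [List.getElem?_take_of_lt hjL, List.getElem?_drop]

-- ===== VERDICT (by name: the statement is the Claim_ definition above) =====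
theorem create_markov_data_spec : Claim_equal_create_markov_data := by
  intro data order _ hpre
  unfold Spec_create_markov_data
  rw [portA_eq data order hpre, portB_eq data order hpre]
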